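-- pv_equiv track=rewrite | github.com/jisu8110/Baekjoon-zip | 프로그래머스/3/150367. 표현 가능한 이진트리/표현 가능한 이진트리.py | solution
-- ===== SOURCE A (Python) =====
-- def solution(numbers):
--     answer = []
--
--     def is_possible(binary_str):
--         n = len(binary_str)
--         if n == 1:
--             return True
--
--         mid = n // 2
--         root = binary_str[mid]
--         left = binary_str[:mid]
--         right = binary_str[mid + 1:]
--
--         if root == '0' and ('1' in left or '1' in right):
--             return False
--
--         return is_possible(left) and is_possible(right)
--
--     for number in numbers:
--         binary_str = bin(number)[2:]
--         k = 0
--         while 2**k - 1 < len(binary_str):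
--             k += 1
--         padded_len = 2**k - 1
--         padded_binary_str = '0' * (padded_len - len(binary_str)) + binary_str
--
--         if is_possible(padded_binary_str):
--             answer.append(1)
--         else:
--             answer.append(0)
--
--     return answer
-- ===== SOURCE B (Python) =====
-- def solution(numbers):
--     def check(s):
--         # one bottom-up pass: returns (subtree_valid, subtree_has_one)
--         if len(s) <= 1:
--             return True, s == '1'
--         mid = len(s) // 2
--         lok, lone = check(s[:mid])
--         rok, rone = check(s[mid + 1:])
--         down = lone or rone
--         ok = lok and rok and not (s[mid] == '0' and down)
--         return ok, s[mid] == '1' or down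
--
--     def pad(s):
--         n = 1
--         while n < len(s):
--             n = 2 * n + 1
--         return '0' * (n - len(s)) + s
--
--     return [1 if check(pad(bin(n)[2:]))[0] else 0 for n in numbers]
-- ===== Notes on version B (the rewrite author's own statement) =====
-- stated objective: alternative
-- what changed: B replaces A's per-node '1'-in-substring membership scans with a single bottom-up pass that returns a (valid, subtree-has-one) flag pair per subtree, so each character is inspected O(1) times instead of once per ancestor level.
import Mathlib
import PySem

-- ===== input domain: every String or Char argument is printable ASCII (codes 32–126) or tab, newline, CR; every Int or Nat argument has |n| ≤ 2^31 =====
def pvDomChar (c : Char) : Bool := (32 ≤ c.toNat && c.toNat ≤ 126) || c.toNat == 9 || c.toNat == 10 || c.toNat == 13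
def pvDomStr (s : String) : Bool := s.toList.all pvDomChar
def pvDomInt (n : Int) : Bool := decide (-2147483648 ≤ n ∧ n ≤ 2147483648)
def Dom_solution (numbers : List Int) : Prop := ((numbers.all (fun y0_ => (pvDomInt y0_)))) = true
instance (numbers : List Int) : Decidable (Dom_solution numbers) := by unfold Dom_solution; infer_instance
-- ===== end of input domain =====

-- B does the valid-tree check in one bottom-up pass returning a (valid, subtree-has-one) pair,
-- replacing A's per-node '1'-in-substring scans; same return value on every input.

-- ===== PORT A =====
-- while 2**k - 1 < len(binary_str): k += 1
def padK (len k : Nat) : Nat := if 2 ^ k - 1 < len then padK len (k + 1) else k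
termination_by len + 1 - 2 ^ k
decreasing_by
  have h1 : 1 ≤ 2 ^ k := Nat.one_le_two_pow
  omega

-- A's is_possible; from `solution` it is only ever called on non-empty strings, and the
-- `≤ 1` guard (instead of Python's `== 1`) just makes the Lean recursion total on [] too.
def isPossible (s : List Char) : Bool :=
  if s.length ≤ 1 then true
  else
    let mid := s.length / 2
    let left := s.take mid                        -- binary_str[:mid]
    let right := s.drop (mid + 1)                 -- binary_str[mid+1:]
    if s.getD mid ' ' == '0' && (left.contains '1' || right.contains '1') then false
    else isPossible left && isPossible right
termination_by s.length
decreasing_by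
  · simp only [List.length_take]; omega
  · simp only [List.length_drop]; omega

def solution (numbers : List Int) : List Int :=
  numbers.foldl (fun answer number =>
    let binaryStr := (PySem.Int.toBinChars0b number).drop 2   -- bin(number)[2:]
    let k := padK binaryStr.length 0
    let paddedLen := 2 ^ k - 1
    let padded := List.replicate (paddedLen - binaryStr.length) '0' ++ binaryStr
    answer ++ [if isPossible padded then 1 else 0]) []

-- ===== PORT B =====
-- while n < len(s): n = 2 * n + 1
def padN (len n : Nat) : Nat := if n < len then padN len (2 * n + 1) else n
termination_by len - n

-- B's check: one bottom-up pass, returns (subtree_valid, subtree_has_one)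
def checkB (s : List Char) : Bool × Bool :=
  if s.length ≤ 1 then (true, s == ['1'])
  else
    let mid := s.length / 2
    let l := checkB (s.take mid)
    let r := checkB (s.drop (mid + 1))
    let down := l.2 || r.2
    (l.1 && r.1 && !(s.getD mid ' ' == '0' && down), s.getD mid ' ' == '1' || down)
termination_by s.length
decreasing_by
  · simp only [List.length_take]; omega
  · simp only [List.length_drop]; omega

def solution_alt (numbers : List Int) : List Int :=
  numbers.map (fun number =>
    let s := (PySem.Int.toBinChars0b number).drop 2   -- bin(n)[2:]
    let n := padN s.length 1
    let padded := List.replicate (n - s.length) '0' ++ s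
    if (checkB padded).1 then 1 else 0)

-- ===== PRECONDITION & SPEC =====
def Spec_solution (numbers : List Int) (out : List Int) : Prop := out = solution_alt numbers
instance (numbers : List Int) (out : List Int) : Decidable (Spec_solution numbers out) := by unfold Spec_solution; infer_instance

-- ===== CLAIM (what is proved, stated in full; the proofs are below) =====
def Claim_equal_solution : Prop := ∀ (numbers : List Int), Dom_solution numbers → Spec_solution numbers (solution numbers)

-- ===== LEMMAS AND PROOFS =====

-- checkB's second component is exactly "the string contains a '1'" (what A tests with `'1' in …`).
theorem checkB_snd (s : List Char) : (checkB s).2 = s.contains '1' := by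
  generalize hn : s.length = n
  induction n using Nat.strong_induction_on generalizing s with
  | _ n IH =>
    subst hn
    rw [checkB]
    by_cases h : s.length ≤ 1
    · rw [if_pos h]
      clear IH
      rcases s with _ | ⟨c, _ | ⟨d, t⟩⟩
      · simp
      · show ([c] == ['1']) = [c].contains '1'
        cases hc : (c == '1')
        · have hne : ¬c = '1' := by simpa using hc
          simp [hc]
          exact fun e => hne e.symm
        · have he : c = '1' := by simpa using hc
          subst he; simp
      · simp at h
    · rw [if_neg h]
      rw [Nat.not_le] at h
      have hm : s.length / 2 < s.length := by omega
      have hgd : s.getD (s.length / 2) ' ' = s[s.length / 2] := List.getD_eq_getElem s ' ' hm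
      have ht : (checkB (s.take (s.length / 2))).2 = (s.take (s.length / 2)).contains '1' :=
        IH _ (by simp only [List.length_take]; omega) _ rfl
      have hd : (checkB (s.drop (s.length / 2 + 1))).2 = (s.drop (s.length / 2 + 1)).contains '1' :=
        IH _ (by simp only [List.length_drop]; omega) _ rfl
      have hs : s.drop (s.length / 2) = s[s.length / 2] :: s.drop (s.length / 2 + 1) :=
        List.drop_eq_getElem_cons hm
      conv_rhs => rw [← List.take_append_drop (s.length / 2) s, hs]
      simp only [List.contains_append, List.contains_cons, ht, hd, hgd]
      cases h1 : (s[s.length / 2] == '1') <;>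
        cases h2 : (s.take (s.length / 2)).contains '1' <;>
        cases h3 : (s.drop (s.length / 2 + 1)).contains '1' <;>
        (simp_all [BEq.comm]; try assumption)

-- A's recursive check agrees with the first component of B's bottom-up pass.
theorem isPossible_eq (s : List Char) : isPossible s = (checkB s).1 := by
  generalize hn : s.length = n
  induction n using Nat.strong_induction_on generalizing s with
  | _ n IH =>
    subst hn
    rw [isPossible, checkB]
    by_cases h : s.length ≤ 1
    · rw [if_pos h, if_pos h]
    · rw [if_neg h, if_neg h]
      rw [Nat.not_le] at h
      have ht : isPossible (s.take (s.length / 2)) = (checkB (s.take (s.length / 2))).1 :=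
        IH _ (by simp only [List.length_take]; omega) _ rfl
      have hd : isPossible (s.drop (s.length / 2 + 1)) = (checkB (s.drop (s.length / 2 + 1))).1 :=
        IH _ (by simp only [List.length_drop]; omega) _ rfl
      simp only [ht, hd, checkB_snd]
      cases (s.getD (s.length / 2) ' ' == '0') <;>
        cases (s.take (s.length / 2)).contains '1' <;>
        cases (s.drop (s.length / 2 + 1)).contains '1' <;>
        cases (checkB (s.take (s.length / 2))).1 <;>
        cases (checkB (s.drop (s.length / 2 + 1))).1 <;> simp

-- the two padding loops compute the same padded length
theorem padN_eq (len k : Nat) : padN len (2 ^ k - 1) = 2 ^ (padK len k) - 1 := by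
  fun_induction padK len k with
  | case1 k hlt ih =>
    rw [padN, if_pos hlt]
    have h1 : 1 ≤ 2 ^ k := Nat.one_le_two_pow
    have h2 : 2 ^ (k + 1) = 2 * 2 ^ k := by ring
    have h3 : 2 * (2 ^ k - 1) + 1 = 2 ^ (k + 1) - 1 := by omega
    rw [h3, ih]
  | case2 k hge =>
    rw [padN, if_neg hge]

theorem toDigitsCore_len_le (b : Nat) (f : Nat) : ∀ (n : Nat) (l : List Char),
    l.length ≤ (Nat.toDigitsCore b f n l).length := by
  induction f with
  | zero => intro n l; simp [Nat.toDigitsCore]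
  | succ f ih =>
    intro n l
    rw [Nat.toDigitsCore]
    by_cases h : n / b = 0
    · simp [h]
    · rw [if_neg h]
      calc l.length ≤ (l.length + 1) := by omega
        _ = (((n % b).digitChar :: l)).length := by simp
        _ ≤ _ := ih _ _

theorem toDigits_ne_nil (b n : Nat) : 1 ≤ (Nat.toDigits b n).length := by
  rw [Nat.toDigits, Nat.toDigitsCore]
  by_cases h : n / b = 0
  · simp [h]
  · rw [if_neg h]
    have := toDigitsCore_len_le b n (n / b) [(n % b).digitChar]
    simp at this; omega

-- bin(n)[2:] is never empty
theorem binStr_ne_nil (n : Int) : 1 ≤ ((PySem.Int.toBinChars0b n).drop 2).length := by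
  rw [PySem.Int.toBinChars0b]
  by_cases h : n < 0
  · simp [h]
  · rw [if_neg h]
    simpa using toDigits_ne_nil 2 n.toNat

-- the two programs compute the same 0/1 verdict for a single number
theorem per_number_eq (number : Int) :
    (if isPossible (List.replicate (2 ^ (padK ((PySem.Int.toBinChars0b number).drop 2).length 0) - 1
        - ((PySem.Int.toBinChars0b number).drop 2).length) '0' ++ (PySem.Int.toBinChars0b number).drop 2)
      then (1 : Int) else 0)
    = (if (checkB (List.replicate (padN ((PySem.Int.toBinChars0b number).drop 2).length 1
        - ((PySem.Int.toBinChars0b number).drop 2).length) '0' ++ (PySem.Int.toBinChars0b number).drop 2)).1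
      then (1 : Int) else 0) := by
  have hlen := binStr_ne_nil number
  have h0 : padK ((PySem.Int.toBinChars0b number).drop 2).length 0
      = padK ((PySem.Int.toBinChars0b number).drop 2).length 1 := by
    rw [padK]
    simp only [pow_zero]
    rw [if_pos (by omega)]
  have hN : padN ((PySem.Int.toBinChars0b number).drop 2).length 1
      = 2 ^ (padK ((PySem.Int.toBinChars0b number).drop 2).length 0) - 1 := by
    rw [h0]
    simpa using padN_eq ((PySem.Int.toBinChars0b number).drop 2).length 1
  rw [hN, isPossible_eq]

-- ===== VERDICT (by name: the statement is the Claim_ definition above) =====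
theorem solution_spec : Claim_equal_solution := by
  unfold Claim_equal_solution
  intro numbers _
  unfold Spec_solution solution solution_alt
  rw [PySem.List.foldl_append_singleton_eq_map]
  simp only [List.nil_append]
  exact List.map_congr_left (fun number _ => per_number_eq number)
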